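-- pv_equiv track=rewrite | github.com/KoreaCodingTestStudyGroup/programmers | stack,queue/Kim_SQ_1_기능개발.py | solution
-- ===== SOURCE A (Python) =====
-- def solution(progresses, speeds):
--     answer = []
--     result = []
--     for index, (i, j) in enumerate(zip(progresses, speeds)):
--         cnt = 0
--         while i < 100:
--             i += j
--             cnt += 1
--             if i >= 100:
--                 answer.append(cnt)
--                 break
--
--
--
--
--     return answer
-- ===== SOURCE B (Python) =====
-- def solution(progresses, speeds):
--     # closed-form ceiling division instead of A's repeated-addition while loop
--     return [(100 - p + s - 1) // s for p, s in zip(progresses, speeds) if p < 100]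
-- ===== Notes on version B (the rewrite author's own statement) =====
-- stated objective: simpler
-- what changed: Replaces each per-task repeated-addition while loop with a single comprehension using the closed-form integer ceiling (100-p+s-1)//s, skipping tasks already at 100%.
import Mathlib
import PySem

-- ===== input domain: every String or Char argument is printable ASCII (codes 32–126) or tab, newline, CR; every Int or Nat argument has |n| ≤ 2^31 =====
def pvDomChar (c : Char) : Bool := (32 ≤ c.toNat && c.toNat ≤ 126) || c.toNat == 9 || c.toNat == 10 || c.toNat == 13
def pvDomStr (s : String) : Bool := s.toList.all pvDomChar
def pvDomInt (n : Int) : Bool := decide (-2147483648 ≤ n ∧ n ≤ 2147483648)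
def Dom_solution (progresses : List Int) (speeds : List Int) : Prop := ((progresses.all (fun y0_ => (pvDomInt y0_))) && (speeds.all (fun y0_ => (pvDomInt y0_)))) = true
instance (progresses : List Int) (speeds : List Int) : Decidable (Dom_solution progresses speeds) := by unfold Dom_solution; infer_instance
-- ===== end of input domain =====

-- B replaces A's repeated-addition while loop by the closed-form integer ceiling (simpler, one pass).

-- ===== PORT A =====
-- A's inner 'while i < 100: i += j; cnt += 1; if i >= 100: append(cnt); break'.
-- The '0 < j' guard only makes the recursion total: Python diverges there (excluded by Pre_).
def loopA (i j cnt : Int) : Int :=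
  if i + j ≥ 100 then cnt + 1
  else if h : 0 < j then loopA (i + j) j (cnt + 1)
  else 0
termination_by (100 - i).toNat
decreasing_by simp at *; omega

def solution (progresses : List Int) (speeds : List Int) : List Int :=
  (List.zip progresses speeds).foldl
    (fun answer p => if p.1 < 100 then answer ++ [loopA p.1 p.2 0] else answer) []

-- ===== PORT B =====
def solution_alt (progresses : List Int) (speeds : List Int) : List Int :=
  ((List.zip progresses speeds).filter (fun p => p.1 < 100)).map
    (fun p => PySem.Int.floordiv (100 - p.1 + p.2 - 1) p.2)

-- ===== PRECONDITION & SPEC =====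
-- Pre_ excludes pairs with progress < 100 and speed ≤ 0, on which A's while loop never terminates.
def Pre_solution (progresses : List Int) (speeds : List Int) : Prop :=
  ∀ p ∈ List.zip progresses speeds, p.1 < 100 → 0 < p.2
instance (progresses : List Int) (speeds : List Int) : Decidable (Pre_solution progresses speeds) := by unfold Pre_solution; infer_instance
def pvWitness_solution : List Int × List Int := ([93, 30, 55], [1, 30, 5])

def Spec_solution (progresses : List Int) (speeds : List Int) (out : List Int) : Prop := out = solution_alt progresses speeds
instance (progresses : List Int) (speeds : List Int) (out : List Int) : Decidable (Spec_solution progresses speeds out) := by unfold Spec_solution; infer_instance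

-- ===== CLAIM (what is proved, stated in full; the proofs are below) =====
def Claim_equal_solution : Prop := ∀ (progresses : List Int) (speeds : List Int), Dom_solution progresses speeds → Pre_solution progresses speeds → Spec_solution progresses speeds (solution progresses speeds)

-- ===== LEMMAS AND PROOFS =====

theorem loopA_eq (i j cnt : Int) (hj : 0 < j) (hi : i < 100) :
    loopA i j cnt = cnt + PySem.Int.floordiv (100 - i + j - 1) j := by
  induction hn : (100 - i).toNat using Nat.strong_induction_on generalizing i cnt with
  | _ n ih =>
    unfold loopA
    by_cases hb : i + j ≥ 100
    · simp only [hb, if_true]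
      have : PySem.Int.floordiv (100 - i + j - 1) j = 1 := by
        rw [PySem.Int.floordiv_eq_iff_of_pos hj]; omega
      omega
    · simp only [hb, if_false, hj, dif_pos]
      rw [ih (100 - (i + j)).toNat (by omega) (i + j) (cnt + 1) (by omega) rfl]
      have : (100 - (i + j) + j - 1) = (100 - i + j - 1) + (-1) * j := by ring
      rw [this]
      simp only [PySem.Int.floordiv]
      rw [Int.add_mul_fdiv_right _ _ (by omega : j ≠ 0)]
      ring

theorem solution_spec : Claim_equal_solution := by
  intro progresses speeds _ hpre
  unfold Spec_solution solution solution_alt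
  rw [PySem.List.foldl_congr_mem (g := fun answer p =>
        if decide (p.1 < 100) = true then answer ++ [PySem.Int.floordiv (100 - p.1 + p.2 - 1) p.2] else answer)]
  · rw [PySem.List.foldl_append_if]; simp
  · intro acc p hp
    by_cases h : p.1 < 100
    · simp [h, loopA_eq p.1 p.2 0 (hpre p hp h) h]
    · simp [h]
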